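-- pv_equiv track=rewrite | github.com/Izhrr/Tucil1_18223129 | src/logic.py | _check_rows_cols
-- ===== SOURCE A (Python) =====
-- def _check_rows_cols(arr):
--     rows = []
--     cols = []
--     for r, c in arr:
--         rows.append(r)
--         cols.append(c)
--     if (len(rows) == len(set(rows))) and (len(cols) == len(set(cols))):
--         return True
--     return False
-- ===== SOURCE B (Python) =====
-- def _check_rows_cols(arr):
--     rows = sorted(r for r, _ in arr)
--     cols = sorted(c for _, c in arr)
--     return all(a != b for a, b in zip(rows, rows[1:])) \
--         and all(a != b for a, b in zip(cols, cols[1:]))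
-- ===== Notes on version B (the rewrite author's own statement) =====
-- stated objective: alternative
-- what changed: Replaces A's hash-set cardinality comparison with sort-then-adjacent-scan: B sorts the row and column indices and checks that no two adjacent sorted values are equal.
import Mathlib
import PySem

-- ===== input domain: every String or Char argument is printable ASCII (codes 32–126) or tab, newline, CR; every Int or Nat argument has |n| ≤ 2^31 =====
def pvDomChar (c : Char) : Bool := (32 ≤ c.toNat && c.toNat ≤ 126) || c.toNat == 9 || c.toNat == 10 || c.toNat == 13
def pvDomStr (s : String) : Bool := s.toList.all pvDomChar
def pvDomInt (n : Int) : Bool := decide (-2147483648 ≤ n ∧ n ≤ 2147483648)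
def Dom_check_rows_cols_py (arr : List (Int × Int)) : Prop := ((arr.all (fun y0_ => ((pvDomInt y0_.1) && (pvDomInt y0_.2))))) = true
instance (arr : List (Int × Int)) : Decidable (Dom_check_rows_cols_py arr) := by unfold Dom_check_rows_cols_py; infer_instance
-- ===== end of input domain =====

-- B replaces A's set-cardinality check with sort-then-adjacent-scan over the row and
-- column indices (a different algorithm, same task; objective: alternative, no speed claim).


-- ===== PORT A =====
-- the loop 'for r, c in arr: rows.append(r); cols.append(c)' as a fold over the pair of lists
def check_rows_cols_py (arr : List (Int × Int)) : Bool :=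
  let rc := arr.foldl (fun (p : List Int × List Int) x => (p.1 ++ [x.1], p.2 ++ [x.2])) ([], [])
  let rows := rc.1
  let cols := rc.2
  if rows.length = (PySem.Set.ofList rows).length ∧ cols.length = (PySem.Set.ofList cols).length then
    true
  else
    false

-- ===== PORT B =====
-- all(a != b for a, b in zip(l, l[1:]))
def pvAdjAllNe (l : List Int) : Bool :=
  (l.zip (PySem.List.slice l (some 1) none)).all (fun p => decide (p.1 ≠ p.2))

def check_rows_cols_py_alt (arr : List (Int × Int)) : Bool :=
  let rows := PySem.List.sorted (arr.map (fun p => p.1)) (fun x => x) false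
  let cols := PySem.List.sorted (arr.map (fun p => p.2)) (fun x => x) false
  pvAdjAllNe rows && pvAdjAllNe cols

-- ===== PRECONDITION & SPEC =====
def Spec_check_rows_cols_py (arr : List (Int × Int)) (out : Bool) : Prop := out = check_rows_cols_py_alt arr
instance (arr : List (Int × Int)) (out : Bool) : Decidable (Spec_check_rows_cols_py arr out) := by unfold Spec_check_rows_cols_py; infer_instance

-- ===== CLAIM (what is proved, stated in full; the proofs are below) =====
def Claim_equal_check_rows_cols_py : Prop := ∀ (arr : List (Int × Int)), Dom_check_rows_cols_py arr → Spec_check_rows_cols_py arr (check_rows_cols_py arr)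

-- ===== LEMMAS AND PROOFS =====

theorem contains_iff_mem (s : List Int) (x : Int) : PySem.Set.contains s x = true ↔ x ∈ s := by
  simp [PySem.Set.contains]

theorem add_of_mem (s : List Int) (x : Int) (hx : x ∈ s) : PySem.Set.add s x = s := by
  simp [PySem.Set.add, PySem.Set.contains, hx]

theorem add_of_not_mem (s : List Int) (x : Int) (hx : x ∉ s) : PySem.Set.add s x = s ++ [x] := by
  simp only [PySem.Set.add]
  split
  · next h => exact absurd ((contains_iff_mem s x).1 h) hx
  · rfl

theorem not_nodup_append_cons (s : List Int) (x : Int) (l : List Int) (hx : x ∈ s) :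
    ¬ (s ++ x :: l).Nodup := by
  rw [List.nodup_append]
  rintro ⟨-, -, hd⟩
  exact hd x hx x (by simp) rfl

theorem foldl_add_length_le (l s : List Int) :
    (l.foldl PySem.Set.add s).length ≤ s.length + l.length := by
  induction l generalizing s with
  | nil => simp
  | cons x t ih =>
    simp only [List.foldl_cons]
    have h1 : (PySem.Set.add s x).length ≤ s.length + 1 := by
      by_cases hx : x ∈ s
      · rw [add_of_mem s x hx]; omega
      · rw [add_of_not_mem s x hx]; simp
    have := ih (PySem.Set.add s x)
    simp only [List.length_cons]
    omega

theorem foldl_add_length_eq_iff (l s : List Int) (hs : s.Nodup) :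
    ((l.foldl PySem.Set.add s).length = s.length + l.length) ↔ (s ++ l).Nodup := by
  induction l generalizing s with
  | nil => simpa using hs
  | cons x t ih =>
    simp only [List.foldl_cons, List.length_cons]
    by_cases hx : x ∈ s
    · rw [add_of_mem s x hx]
      constructor
      · intro h
        have := foldl_add_length_le t s
        omega
      · intro h
        exact (not_nodup_append_cons s x t hx h).elim
    · rw [add_of_not_mem s x hx]
      have hsx : (s ++ [x]).Nodup := by
        rw [List.nodup_append]
        refine ⟨hs, List.nodup_singleton x, ?_⟩
        rintro a ha b hb rfl
        simp only [List.mem_singleton] at hb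
        exact hx (hb ▸ ha)
      have hiff := ih (s ++ [x]) hsx
      simp only [List.length_append, List.length_singleton] at hiff
      rw [show (s ++ [x]) ++ t = s ++ x :: t from by simp] at hiff
      constructor
      · intro h; exact hiff.1 (by omega)
      · intro h; have := hiff.2 h; omega

theorem set_card_eq_iff (l : List Int) :
    (l.length = (PySem.Set.ofList l).length) ↔ l.Nodup := by
  rw [PySem.Set.ofList_eq_foldl, eq_comm]
  simpa using foldl_add_length_eq_iff l [] (by simp)

-- A's fold builds exactly (map fst, map snd)
theorem foldl_pair_eq (arr : List (Int × Int)) (rs cs : List Int) :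
    arr.foldl (fun (p : List Int × List Int) x => (p.1 ++ [x.1], p.2 ++ [x.2])) (rs, cs)
      = (rs ++ arr.map Prod.fst, cs ++ arr.map Prod.snd) := by
  induction arr generalizing rs cs with
  | nil => simp
  | cons x t ih => simp [ih]

-- the zip-with-tail all-distinct test is the adjacent chain condition
theorem adjAllNe_eq_chain' (l : List Int) :
    pvAdjAllNe l = true ↔ List.IsChain (· ≠ ·) l := by
  unfold pvAdjAllNe
  rw [PySem.List.slice_from_one]
  induction l with
  | nil => simp
  | cons a t ih =>
    cases t with
    | nil => simp
    | cons b u =>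
      simp only [List.tail_cons, List.zip_cons_cons, List.all_cons, List.isChain_cons_cons,
        Bool.and_eq_true, decide_eq_true_eq] at *
      rw [← ih]

-- on a ≤-sorted list, no two adjacent elements equal ↔ Nodup
theorem chain'_ne_iff_nodup (l : List Int) (h : l.Pairwise (· ≤ ·)) :
    List.IsChain (· ≠ ·) l ↔ l.Nodup := by
  induction l with
  | nil => simp
  | cons a t ih =>
    rw [List.pairwise_cons] at h
    obtain ⟨hle, hp⟩ := h
    rw [List.isChain_cons, List.nodup_cons, ih hp]
    constructor
    · rintro ⟨hh, hc⟩
      refine ⟨?_, hc⟩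
      intro ha
      cases t with
      | nil => simp at ha
      | cons b u =>
        have hab : a ≠ b := hh b rfl
        rcases List.mem_cons.1 ha with h0 | ha'
        · exact hab h0
        · -- a in u, but b ≤ a (pairwise) and a ≤ b (hle), so a = b
          rw [List.pairwise_cons] at hp
          have h1 : b ≤ a := hp.1 a ha'
          have h2 : a ≤ b := hle b (by simp)
          exact hab (le_antisymm h2 h1)
    · rintro ⟨hna, hc⟩
      refine ⟨?_, hc⟩
      intro x hx
      cases t with
      | nil => simp at hx
      | cons b u =>
        simp only [List.head?_cons, Option.mem_def, Option.some.injEq] at hx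
        intro hab
        exact hna (by simp [hab, ← hx])

theorem adjAllNe_sorted_eq_nodup (l : List Int) :
    pvAdjAllNe (PySem.List.sorted l (fun x => x) false) = decide l.Nodup := by
  have hp := PySem.List.sorted_pairwise l (fun x => x)
  have hperm := PySem.List.sorted_perm l (fun x => x) false
  by_cases hn : l.Nodup
  · have : (PySem.List.sorted l (fun x => x) false).Nodup := hperm.nodup_iff.2 hn
    simp [hn, (adjAllNe_eq_chain' _).2 ((chain'_ne_iff_nodup _ hp).2 this)]
  · have : ¬ (PySem.List.sorted l (fun x => x) false).Nodup := fun h => hn (hperm.nodup_iff.1 h)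
    have h2 : ¬ pvAdjAllNe (PySem.List.sorted l (fun x => x) false) = true := by
      intro h
      exact this ((chain'_ne_iff_nodup _ hp).1 ((adjAllNe_eq_chain' _).1 h))
    simp [hn, h2]

-- ===== VERDICT (by name: the statement is the Claim_ definition above) =====
theorem check_rows_cols_py_spec : Claim_equal_check_rows_cols_py := by
  intro arr _
  unfold Spec_check_rows_cols_py check_rows_cols_py check_rows_cols_py_alt
  rw [foldl_pair_eq]
  simp only [List.nil_append]
  have hm1 : (arr.map (fun p => p.1)) = arr.map Prod.fst := rfl
  have hm2 : (arr.map (fun p => p.2)) = arr.map Prod.snd := rfl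
  rw [hm1, hm2, adjAllNe_sorted_eq_nodup, adjAllNe_sorted_eq_nodup]
  have e1 : (arr.length = (PySem.Set.ofList (arr.map Prod.fst)).length) ↔ (arr.map Prod.fst).Nodup := by
    rw [show arr.length = (arr.map Prod.fst).length by simp]
    exact set_card_eq_iff _
  have e2 : (arr.length = (PySem.Set.ofList (arr.map Prod.snd)).length) ↔ (arr.map Prod.snd).Nodup := by
    rw [show arr.length = (arr.map Prod.snd).length by simp]
    exact set_card_eq_iff _
  by_cases h1 : (arr.map Prod.fst).Nodup <;> by_cases h2 : (arr.map Prod.snd).Nodup <;>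
    simp [h1, h2, e1, e2]
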